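-- pv_equiv track=rewrite | github.com/pypi-data/pypi-mirror-91 | packages/sisaptoolsDev/sisaptoolsDev-0.0.19-py3-none-any.whl/sisaptoolsDev/database.py | get_selects
-- ===== SOURCE A (Python) =====
-- def get_selects(sql):
--     sqlSelect = sql[sql.find("select") + 6:sql.find("from")]
--     i = 0
--     stack = []
--     rm = []
--     while i < len(sqlSelect):
--         if "(" == sqlSelect[i]:
--             stack.append(i)
--         elif ")" == sqlSelect[i]:
--             if len(stack) == 1:
--                 rm.append((stack.pop(), i))
--             else:
--                 stack.pop()
--         i += 1
--     rm.reverse()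
--     for r1, r2 in rm:
--         sqlSelect = sqlSelect[0:r1] + sqlSelect[r2 + 1:]
--     sqlSelect = (sqlSelect.replace(" ", "").replace("distinct", "")
--                  .replace("\n", "").lower().split(","))
--     return sqlSelect
-- ===== SOURCE B (Python) =====
-- def get_selects(sql):
--     region = sql[sql.find("select") + 6:sql.find("from")]
--     out = []
--     pending = []
--     depth = 0
--     for ch in region:
--         if ch == "(":
--             depth += 1
--             pending.append(ch)
--         elif ch == ")":
--             depth -= 1
--             if depth == 0:
--                 pending = []
--             else:
--                 pending.append(ch)
--         else:
--             if depth == 0: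
--                 out.append(ch)
--             else:
--                 pending.append(ch)
--     out.extend(pending)
--     s = "".join(out)
--     return (s.replace(" ", "").replace("distinct", "")
--              .replace("\n", "").lower().split(","))
-- ===== Notes on version B (the rewrite author's own statement) =====
-- stated objective: faster
-- what changed: replaces A's index/stack pass that records outermost paren-pair positions followed by repeated string-slicing removals with a single left-to-right scan that tracks paren depth and buffers the characters of the currently open outermost group, discarding the buffer when the group closes
import Mathlib
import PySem

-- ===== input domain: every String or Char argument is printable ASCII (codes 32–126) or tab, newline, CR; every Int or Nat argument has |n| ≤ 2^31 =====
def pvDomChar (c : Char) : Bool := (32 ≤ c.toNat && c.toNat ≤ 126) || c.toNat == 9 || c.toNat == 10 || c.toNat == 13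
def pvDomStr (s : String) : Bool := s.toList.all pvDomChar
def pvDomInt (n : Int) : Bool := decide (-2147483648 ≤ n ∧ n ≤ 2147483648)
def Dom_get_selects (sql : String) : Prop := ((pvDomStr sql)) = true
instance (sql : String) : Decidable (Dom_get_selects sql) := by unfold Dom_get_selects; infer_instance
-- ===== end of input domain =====

-- B replaces A's record-outermost-paren-pairs pass plus repeated slicing removals by one
-- depth-tracking scan (objective: faster, asymptotic O(n) vs O(n^2)).

-- ===== PORT A =====
-- shared extraction: sql[sql.find("select") + 6 : sql.find("from")]  (both Pythons start identically)
def pvRegion (sql : String) : List Char :=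
  PySem.Chars.slice sql.toList (some (PySem.Chars.find sql.toList "select".toList + 6))
    (some (PySem.Chars.find sql.toList "from".toList))

-- shared tail: .replace(" ","").replace("distinct","").replace("\n","").lower().split(",")
-- (identical builtin chain in both Pythons)
def pvPost (s : List Char) : List String :=
  (PySem.Chars.splitOn
    (PySem.Chars.lower
      (PySem.Chars.replace
        (PySem.Chars.replace (PySem.Chars.replace s [' '] []) "distinct".toList [])
        ['\n'] []))
    [',']).map String.ofList

-- A's while-loop: i, stack (Python list used as a stack: top of stack = head here), rm.
-- none = the stack.pop() on an empty stack, where Python raises IndexError (outside Pre_).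
def pvLoopA (cs : List Char) (i : Nat) (stack : List Nat) (rm : List (Nat × Nat)) :
    Option (List (Nat × Nat)) :=
  if h : i < cs.length then
    if cs[i] = '(' then pvLoopA cs (i+1) (i :: stack) rm
    else if cs[i] = ')' then
      match stack with
      | [] => none
      | [j] => pvLoopA cs (i+1) [] (rm ++ [(j, i)])
      | _ :: rest => pvLoopA cs (i+1) rest rm
    else pvLoopA cs (i+1) stack rm
  else some rm
termination_by cs.length - i

-- sqlSelect = sqlSelect[0:r1] + sqlSelect[r2+1:]
def pvRemove (s : List Char) (p : Nat × Nat) : List Char :=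
  PySem.Chars.slice s (some 0) (some (p.1 : Int)) ++
    PySem.Chars.slice s (some ((p.2 : Int) + 1)) none

def get_selects (sql : String) : List String :=
  let sqlSelect := pvRegion sql
  match pvLoopA sqlSelect 0 [] [] with
  | none => []        -- Python raises IndexError here; excluded by Pre_get_selects
  | some rm => pvPost ((rm.reverse).foldl pvRemove sqlSelect)

-- ===== PORT B =====
-- single pass: out = chars kept so far, pending = chars of the currently open outermost group
def pvScanB : List Char → Int → List Char → List Char → List Char
  | [], _, out, pending => out ++ pending
  | c :: rest, depth, out, pending =>
    if c = '(' then pvScanB rest (depth + 1) out (pending ++ [c])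
    else if c = ')' then
      if depth - 1 = 0 then pvScanB rest (depth - 1) out []
      else pvScanB rest (depth - 1) out (pending ++ [c])
    else
      if depth = 0 then pvScanB rest depth (out ++ [c]) pending
      else pvScanB rest depth out (pending ++ [c])

def get_selects_alt (sql : String) : List String :=
  pvPost (pvScanB (pvRegion sql) 0 [] [])

-- ===== PRECONDITION & SPEC =====
-- Pre_ excludes exactly the inputs on which A raises IndexError: those whose select..from
-- region has a prefix containing more closing than opening parentheses (stack.pop() on an
-- empty stack).
def Pre_get_selects (sql : String) : Prop :=
  ∀ k, k < (pvRegion sql).length + 1 →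
    ((pvRegion sql).take k).count ')' ≤ ((pvRegion sql).take k).count '('
instance (sql : String) : Decidable (Pre_get_selects sql) := by
  unfold Pre_get_selects; infer_instance

def pvWitness_get_selects : String := "select a, count(x) from t"

def Spec_get_selects (sql : String) (out : List String) : Prop := out = get_selects_alt sql
instance (sql : String) (out : List String) : Decidable (Spec_get_selects sql out) := by
  unfold Spec_get_selects; infer_instance

-- ===== CLAIM (what is proved, stated in full; the proofs are below) =====
def Claim_equal_get_selects : Prop :=
  ∀ (sql : String), Dom_get_selects sql → Pre_get_selects sql →
    Spec_get_selects sql (get_selects sql)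

-- ===== LEMMAS AND PROOFS =====

-- balanced-prefix condition (the body of Pre_, on an arbitrary char list)
def pvBal (cs : List Char) : Prop :=
  ∀ k, k < cs.length + 1 → (cs.take k).count ')' ≤ (cs.take k).count '('

-- consume chars until paren depth d returns to 0; some (k, t): k chars consumed
-- (the matching close is the k-th), t the remainder
def pvSkip : List Char → Nat → Option (Nat × List Char)
  | [], _ => none
  | c :: r, d =>
    if c = '(' then (pvSkip r (d+1)).map (fun p => (p.1 + 1, p.2))
    else if c = ')' then
      if d = 1 then some (1, r) else (pvSkip r (d-1)).map (fun p => (p.1 + 1, p.2))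
    else (pvSkip r d).map (fun p => (p.1 + 1, p.2))

theorem pvSkip_some : ∀ (r : List Char) (d k : Nat) (t : List Char),
    1 ≤ d → pvSkip r d = some (k, t) →
    1 ≤ k ∧ k ≤ r.length ∧ t = r.drop k ∧
      (r.take k).count ')' = (r.take k).count '(' + d := by
  intro r
  induction r with
  | nil => intro d k t _ h; simp [pvSkip] at h
  | cons c r ih =>
    intro d k t hd h
    by_cases hc : c = '('
    · simp only [pvSkip, if_pos hc, Option.map_eq_some_iff] at h
      obtain ⟨⟨k', t'⟩, hp, he⟩ := h
      obtain ⟨he1, he2⟩ := Prod.mk.injEq .. ▸ he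
      obtain ⟨h1, h2, h3, h4⟩ := ih (d+1) k' t' (by omega) hp
      subst he1; subst he2; subst hc; subst h3
      refine ⟨by omega, by simp; omega, by simp, ?_⟩
      simp [List.take_succ_cons, List.count_cons, h4]; omega
    · by_cases hc2 : c = ')'
      · by_cases hd1 : d = 1
        · simp only [pvSkip, if_neg hc, if_pos hc2, if_pos hd1, Option.some.injEq,
            Prod.mk.injEq] at h
          obtain ⟨he1, he2⟩ := h
          subst he1; subst he2; subst hc2; subst hd1
          simp [List.count_cons]
        · simp only [pvSkip, if_neg hc, if_pos hc2, if_neg hd1, Option.map_eq_some_iff] at h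
          obtain ⟨⟨k', t'⟩, hp, he⟩ := h
          obtain ⟨he1, he2⟩ := Prod.mk.injEq .. ▸ he
          obtain ⟨h1, h2, h3, h4⟩ := ih (d-1) k' t' (by omega) hp
          subst he1; subst he2; subst hc2; subst h3
          refine ⟨by omega, by simp; omega, by simp, ?_⟩
          simp [List.take_succ_cons, List.count_cons, h4]
          omega
      · simp only [pvSkip, if_neg hc, if_neg hc2, Option.map_eq_some_iff] at h
        obtain ⟨⟨k', t'⟩, hp, he⟩ := h
        obtain ⟨he1, he2⟩ := Prod.mk.injEq .. ▸ he
        obtain ⟨h1, h2, h3, h4⟩ := ih d k' t' hd hp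
        subst he1; subst he2; subst h3
        refine ⟨by omega, by simp; omega, by simp, ?_⟩
        simp [List.take_succ_cons, List.count_cons, h4, hc, hc2]

-- the canonical result of stripping outermost matched groups (unmatched '(' keeps its tail)
def pvF : List Char → List Char
  | [] => []
  | c :: r =>
    if c = '(' then
      match h : pvSkip r 1 with
      | some (_, t) => pvF t
      | none => c :: r
    else c :: pvF r
termination_by cs => cs.length
decreasing_by
  · obtain ⟨h1, h2, h3, -⟩ := pvSkip_some r 1 _ _ (by omega) h
    subst h3; simp
  · simp

-- the list of outermost matched groups, with absolute positions, in order
def pvGroups : List Char → Nat → List (Nat × Nat)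
  | [], _ => []
  | c :: r, i =>
    if c = '(' then
      match h : pvSkip r 1 with
      | some (k, t) => (i, i + k) :: pvGroups t (i + 1 + k)
      | none => []
    else pvGroups r (i + 1)
termination_by cs _ => cs.length
decreasing_by
  · obtain ⟨h1, h2, h3, -⟩ := pvSkip_some r 1 _ _ (by omega) h
    subst h3; simp
  · simp

-- structural twin of pvLoopA
def pvLoopA' : List Char → Nat → List Nat → List (Nat × Nat) → Option (List (Nat × Nat))
  | [], _, _, rm => some rm
  | c :: r, i, stack, rm =>
    if c = '(' then pvLoopA' r (i+1) (i :: stack) rm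
    else if c = ')' then
      match stack with
      | [] => none
      | [j] => pvLoopA' r (i+1) [] (rm ++ [(j, i)])
      | _ :: rest => pvLoopA' r (i+1) rest rm
    else pvLoopA' r (i+1) stack rm

theorem pvF_lparen_some (r : List Char) (k : Nat) (t : List Char)
    (h : pvSkip r 1 = some (k, t)) : pvF ('(' :: r) = pvF t := by
  rw [pvF.eq_2, if_pos rfl]
  split
  · rename_i k' t' h'
    rw [h] at h'
    injection h' with h''
    injection h'' with h1 h2
    rw [h2]
  · rename_i h'
    rw [h] at h'
    simp at h'

theorem pvF_lparen_none (r : List Char) (h : pvSkip r 1 = none) :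
    pvF ('(' :: r) = '(' :: r := by
  rw [pvF.eq_2, if_pos rfl]
  split
  · rename_i k' t' h'
    rw [h] at h'
    simp at h'
  · rfl

theorem pvF_other {c : Char} (r : List Char) (h1 : c ≠ '(') :
    pvF (c :: r) = c :: pvF r := by
  rw [pvF.eq_2, if_neg h1]

theorem pvGroups_lparen_some (r : List Char) (i k : Nat) (t : List Char)
    (h : pvSkip r 1 = some (k, t)) :
    pvGroups ('(' :: r) i = (i, i + k) :: pvGroups t (i + 1 + k) := by
  rw [pvGroups.eq_2, if_pos rfl]
  split
  · rename_i k' t' h'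
    rw [h] at h'
    injection h' with h''
    injection h'' with h1 h2
    rw [h1, h2]
  · rename_i h'
    rw [h] at h'
    simp at h'

theorem pvGroups_lparen_none (r : List Char) (i : Nat) (h : pvSkip r 1 = none) :
    pvGroups ('(' :: r) i = [] := by
  rw [pvGroups.eq_2, if_pos rfl]
  split
  · rename_i k' t' h'
    rw [h] at h'
    simp at h'
  · rfl

theorem pvGroups_other {c : Char} (r : List Char) (i : Nat) (h1 : c ≠ '(') :
    pvGroups (c :: r) i = pvGroups r (i + 1) := by
  rw [pvGroups.eq_2, if_neg h1]

theorem pvLoopA_eq_loopA' : ∀ (n : Nat) (cs : List Char) (i : Nat) (stack : List Nat)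
    (rm : List (Nat × Nat)), cs.length - i ≤ n →
    pvLoopA cs i stack rm = pvLoopA' (cs.drop i) i stack rm := by
  intro n
  induction n with
  | zero =>
    intro cs i stack rm hn
    rw [pvLoopA.eq_def, dif_neg (by omega), List.drop_eq_nil_of_le (by omega)]
    rfl
  | succ n ih =>
    intro cs i stack rm hn
    by_cases h : i < cs.length
    · rw [pvLoopA.eq_def, dif_pos h, List.drop_eq_getElem_cons h]
      simp only [pvLoopA']
      split_ifs with h1 h2
      · exact ih cs (i+1) (i :: stack) rm (by omega)
      · rcases stack with _ | ⟨j, _ | ⟨j2, rest⟩⟩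
        · rfl
        · exact ih cs (i+1) [] (rm ++ [(j, i)]) (by omega)
        · exact ih cs (i+1) (j2 :: rest) rm (by omega)
      · exact ih cs (i+1) stack rm (by omega)
    · rw [pvLoopA.eq_def, dif_neg h, List.drop_eq_nil_of_le (by omega)]
      rfl

theorem pvBal_not_rparen (r : List Char) : ¬ pvBal (')' :: r) := by
  intro h
  have := h 1 (by simp)
  simp [List.count_cons] at this

theorem pvBal_cons {c : Char} {r : List Char} (h1 : c ≠ '(') (h2 : c ≠ ')')
    (h : pvBal (c :: r)) : pvBal r := by
  intro k hk
  have := h (k+1) (by simp; omega)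
  simpa [List.take_succ_cons, List.count_cons, h1, h2] using this

theorem pvBal_skip {r : List Char} {k : Nat} {t : List Char}
    (h : pvBal ('(' :: r)) (hs : pvSkip r 1 = some (k, t)) : pvBal t := by
  intro m hm
  obtain ⟨h1, h2, h3, h4⟩ := pvSkip_some r 1 k t (by omega) hs
  have hlen : t.length = r.length - k := by subst h3; simp
  have hb := h (1 + k + m) (by simp; omega)
  have he : (1 : Nat) + k + m = (k + m) + 1 := by omega
  rw [he, List.take_succ_cons, List.take_add, ← h3] at hb
  simp [List.count_append, List.count_cons] at hb
  simp only [h4] at hb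
  omega

-- pump lemma: with a nonempty stack (bottom b, mid above it), the loop skips to the close
theorem pvLoopA'_pump : ∀ (r : List Char) (i : Nat) (mid : List Nat) (b : Nat)
    (rm : List (Nat × Nat)),
    pvLoopA' r i (mid ++ [b]) rm =
      match pvSkip r (mid.length + 1) with
      | none => some rm
      | some (k, t) => pvLoopA' t (i + k) [] (rm ++ [(b, i + k - 1)]) := by
  intro r
  induction r with
  | nil => intro i mid b rm; simp [pvLoopA', pvSkip]
  | cons c r' ih =>
    intro i mid b rm
    by_cases h1 : c = '('
    · have hstack : i :: (mid ++ [b]) = (i :: mid) ++ [b] := rfl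
      simp only [pvLoopA', if_pos h1, pvSkip, hstack]
      rw [ih (i+1) (i :: mid) b rm]
      cases hsk : pvSkip r' (mid.length + 1 + 1) with
      | none => simp [hsk]
      | some p =>
        obtain ⟨k, t⟩ := p
        have e1 : i + 1 + k = i + (k + 1) := by omega
        simp only [List.length_cons, hsk, Option.map_some, e1]
    · by_cases h2 : c = ')'
      · rcases mid with _ | ⟨m, ms⟩
        · simp only [pvLoopA', if_neg h1, if_pos h2, pvSkip, List.nil_append,
            List.length_nil, if_pos rfl]
          simp
        · rcases hh : ms ++ [b] with _ | ⟨x, xs⟩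
          · simp at hh
          · simp only [pvLoopA', if_neg h1, if_pos h2, List.cons_append, hh, pvSkip]
            rw [← hh, ih (i+1) ms b rm]
            have hd : ¬ ((m :: ms).length + 1 = 1) := by simp
            rw [if_neg hd]
            cases hsk : pvSkip r' (ms.length + 1) with
            | none => simp [List.length_cons, hsk]
            | some p =>
              obtain ⟨k, t⟩ := p
              have e1 : i + 1 + k = i + (k + 1) := by omega
              have e3 : ms.length + 1 + 1 - 1 = ms.length + 1 := by omega
              simp only [List.length_cons, e3, hsk, Option.map_some, e1]
      · simp only [pvLoopA', if_neg h1, if_neg h2, pvSkip]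
        rw [ih (i+1) mid b rm]
        cases hsk : pvSkip r' (mid.length + 1) with
        | none => simp [hsk]
        | some p =>
          obtain ⟨k, t⟩ := p
          have e1 : i + 1 + k = i + (k + 1) := by omega
          simp only [Option.map_some, e1]

theorem pvLoopA'_ground : ∀ (cs : List Char), pvBal cs → ∀ (i : Nat) (rm : List (Nat × Nat)),
    pvLoopA' cs i [] rm = some (rm ++ pvGroups cs i) := by
  suffices H : ∀ (n : Nat) (cs : List Char), cs.length ≤ n → pvBal cs →
      ∀ (i : Nat) (rm : List (Nat × Nat)), pvLoopA' cs i [] rm = some (rm ++ pvGroups cs i) by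
    exact fun cs hb i rm => H cs.length cs le_rfl hb i rm
  intro n
  induction n with
  | zero =>
    intro cs hl _ i rm
    have : cs = [] := List.eq_nil_of_length_eq_zero (by omega)
    subst this
    rw [pvGroups.eq_1]
    simp [pvLoopA']
  | succ n ih =>
    intro cs hl hb i rm
    match cs with
    | [] =>
      rw [pvGroups.eq_1]
      simp [pvLoopA']
    | c :: r =>
      by_cases h1 : c = '('
      · subst h1
        simp only [pvLoopA', if_pos rfl]
        rw [show (i :: ([] : List Nat)) = [] ++ [i] from rfl,
          pvLoopA'_pump r (i+1) [] i rm]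
        cases hsk : pvSkip r 1 with
        | none =>
          simp only [List.length_nil, Nat.zero_add, hsk]
          rw [pvGroups_lparen_none r i hsk]
          simp
        | some p =>
          obtain ⟨k, t⟩ := p
          obtain ⟨hk1, hk2, ht, hcnt⟩ := pvSkip_some r 1 k t (by omega) hsk
          have hbt := pvBal_skip hb hsk
          have hlt : t.length ≤ n := by
            subst ht; simp only [List.length_drop]
            simp at hl; omega
          simp only [List.length_nil, Nat.zero_add, hsk]
          rw [show i + 1 + k - 1 = i + k from by omega,
            ih t hlt hbt (i + 1 + k) (rm ++ [(i, i + k)]),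
            pvGroups_lparen_some r i k t hsk]
          simp
      · by_cases h2 : c = ')'
        · subst h2
          exact absurd hb (pvBal_not_rparen r)
        · simp only [pvLoopA', if_neg h1, if_neg h2]
          have hlr : r.length ≤ n := by simp at hl; omega
          rw [ih r hlr (pvBal_cons h1 h2 hb) (i+1) rm, pvGroups_other r i h1]

theorem pvRemove_eq (s : List Char) (p : Nat × Nat) :
    pvRemove s p = s.take p.1 ++ s.drop (p.2 + 1) := by
  obtain ⟨r1, r2⟩ := p
  have h : ((r2 : Int) + 1) = ((r2 + 1 : Nat) : Int) := by push_cast; ring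
  simp only [pvRemove, PySem.Chars.slice_eq_listSlice, PySem.List.slice_zero_start,
    PySem.List.slice_to_natCast, h, PySem.List.slice_from_natCast]

theorem pvFold_remove : ∀ (cs : List Char), pvBal cs → ∀ (pre : List Char),
    ((pvGroups cs pre.length).reverse).foldl pvRemove (pre ++ cs) = pre ++ pvF cs := by
  suffices H : ∀ (n : Nat) (cs : List Char), cs.length ≤ n → pvBal cs → ∀ (pre : List Char),
      ((pvGroups cs pre.length).reverse).foldl pvRemove (pre ++ cs) = pre ++ pvF cs by
    exact fun cs hb pre => H cs.length cs le_rfl hb pre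
  intro n
  induction n with
  | zero =>
    intro cs hl _ pre
    have : cs = [] := List.eq_nil_of_length_eq_zero (by omega)
    subst this
    rw [pvGroups.eq_1, pvF.eq_1]
    simp
  | succ n ih =>
    intro cs hl hb pre
    match cs with
    | [] =>
      rw [pvGroups.eq_1, pvF.eq_1]
      simp
    | c :: r =>
      by_cases h1 : c = '('
      · subst h1
        cases hsk : pvSkip r 1 with
        | none =>
          rw [pvGroups_lparen_none r pre.length hsk, pvF_lparen_none r hsk]
          simp
        | some p =>
          obtain ⟨k, t⟩ := p
          obtain ⟨hk1, hk2, ht, hcnt⟩ := pvSkip_some r 1 k t (by omega) hsk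
          have hbt := pvBal_skip hb hsk
          have hlt : t.length ≤ n := by
            subst ht; simp only [List.length_drop]
            simp at hl; omega
          rw [pvGroups_lparen_some r pre.length k t hsk, pvF_lparen_some r k t hsk,
            List.reverse_cons, List.foldl_append]
          have hsplit : pre ++ '(' :: r = (pre ++ '(' :: r.take k) ++ t := by
            conv_lhs => rw [← List.take_append_drop k r, ← ht]
            simp
          have hlen2 : (pre ++ '(' :: r.take k).length = pre.length + 1 + k := by
            simp [List.length_take]
            omega
          rw [hsplit, ← hlen2, ih t hlt hbt (pre ++ '(' :: r.take k)]
          simp only [List.foldl_cons, List.foldl_nil]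
          rw [pvRemove_eq]
          have htake : ((pre ++ '(' :: r.take k) ++ pvF t).take pre.length = pre := by
            rw [List.append_assoc]
            exact List.take_left
          have hdrop : ((pre ++ '(' :: r.take k) ++ pvF t).drop (pre.length + k + 1) = pvF t := by
            rw [show pre.length + k + 1 = (pre ++ '(' :: r.take k).length from by
              rw [hlen2]; omega]
            exact List.drop_left
          simp only [htake, hdrop]
      · by_cases h2 : c = ')'
        · subst h2
          exact absurd hb (pvBal_not_rparen r)
        · rw [pvGroups_other r pre.length h1, pvF_other r h1]
          have hlr : r.length ≤ n := by simp at hl; omega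
          have hsp : pre ++ c :: r = (pre ++ [c]) ++ r := by simp
          rw [hsp, show pre.length + 1 = (pre ++ [c]).length from by simp,
            ih r hlr (pvBal_cons h1 h2 hb) (pre ++ [c])]
          simp

theorem pvScanB_pump : ∀ (r : List Char) (d : Nat), 1 ≤ d →
    ∀ (out pending : List Char),
    pvScanB r (d : Int) out pending =
      match pvSkip r d with
      | none => out ++ pending ++ r
      | some (_, t) => pvScanB t 0 out [] := by
  intro r
  induction r with
  | nil => intro d hd out pending; simp [pvScanB, pvSkip]
  | cons c r' ih =>
    intro d hd out pending
    by_cases h1 : c = '('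
    · simp only [pvScanB, if_pos h1]
      have hc : (d : Int) + 1 = ((d + 1 : Nat) : Int) := by omega
      rw [hc, ih (d+1) (by omega) out (pending ++ [c])]
      simp only [pvSkip, if_pos h1]
      cases hsk : pvSkip r' (d+1) with
      | none => simp [hsk, h1]
      | some p => obtain ⟨k, t⟩ := p; simp [hsk]
    · by_cases h2 : c = ')'
      · simp only [pvScanB, if_neg h1, if_pos h2]
        by_cases hd1 : d = 1
        · subst hd1
          rw [if_pos (by norm_num)]
          simp only [pvSkip, if_neg h1, if_pos h2, if_pos rfl]
          norm_num
        · rw [if_neg (by omega)]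
          have hc : (d : Int) - 1 = ((d - 1 : Nat) : Int) := by omega
          rw [hc, ih (d-1) (by omega) out (pending ++ [c])]
          simp only [pvSkip, if_neg h1, if_pos h2, if_neg hd1]
          cases hsk : pvSkip r' (d-1) with
          | none => simp [hsk, h2]
          | some p => obtain ⟨k, t⟩ := p; simp [hsk]
      · simp only [pvScanB, if_neg h1, if_neg h2]
        rw [if_neg (by omega)]
        rw [ih d hd out (pending ++ [c])]
        simp only [pvSkip, if_neg h1, if_neg h2]
        cases hsk : pvSkip r' d with
        | none => simp [hsk]
        | some p => obtain ⟨k, t⟩ := p; simp [hsk]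

theorem pvScanB_ground : ∀ (cs : List Char), pvBal cs → ∀ (out : List Char),
    pvScanB cs 0 out [] = out ++ pvF cs := by
  suffices H : ∀ (n : Nat) (cs : List Char), cs.length ≤ n → pvBal cs → ∀ (out : List Char),
      pvScanB cs 0 out [] = out ++ pvF cs by
    exact fun cs hb out => H cs.length cs le_rfl hb out
  intro n
  induction n with
  | zero =>
    intro cs hl _ out
    have : cs = [] := List.eq_nil_of_length_eq_zero (by omega)
    subst this
    rw [pvF.eq_1]
    simp [pvScanB]
  | succ n ih =>
    intro cs hl hb out
    match cs with
    | [] =>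
      rw [pvF.eq_1]
      simp [pvScanB]
    | c :: r =>
      by_cases h1 : c = '('
      · subst h1
        simp only [pvScanB, if_pos rfl]
        rw [show ((0 : Int) + 1) = ((1 : Nat) : Int) from by norm_num,
          pvScanB_pump r 1 (le_refl 1) out ([] ++ ['('])]
        cases hsk : pvSkip r 1 with
        | none =>
          rw [pvF_lparen_none r hsk]
          simp
        | some p =>
          obtain ⟨k, t⟩ := p
          obtain ⟨hk1, hk2, ht, hcnt⟩ := pvSkip_some r 1 k t (by omega) hsk
          have hbt := pvBal_skip hb hsk
          have hlt : t.length ≤ n := by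
            subst ht; simp only [List.length_drop]
            simp at hl; omega
          rw [pvF_lparen_some r k t hsk]
          exact ih t hlt hbt out
      · by_cases h2 : c = ')'
        · subst h2
          exact absurd hb (pvBal_not_rparen r)
        · simp only [pvScanB, if_neg h1, if_neg h2, if_pos rfl]
          have hlr : r.length ≤ n := by simp at hl; omega
          rw [ih r hlr (pvBal_cons h1 h2 hb) (out ++ [c]), pvF_other r h1]
          simp

-- ===== VERDICT (by name: the statement is the Claim_ definition above) =====
theorem get_selects_spec : Claim_equal_get_selects := by
  intro sql _ hpre
  have hb : pvBal (pvRegion sql) := hpre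
  have hA : pvLoopA (pvRegion sql) 0 [] [] = some (pvGroups (pvRegion sql) 0) := by
    rw [pvLoopA_eq_loopA' (pvRegion sql).length (pvRegion sql) 0 [] [] (by omega),
      List.drop_zero, pvLoopA'_ground (pvRegion sql) hb 0 []]
    simp
  have hf := pvFold_remove (pvRegion sql) hb []
  simp only [List.length_nil, List.nil_append] at hf
  show get_selects sql = get_selects_alt sql
  unfold get_selects get_selects_alt
  simp only [hA]
  rw [pvScanB_ground (pvRegion sql) hb [], hf]
  simp
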